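-- pv_equiv track=rewrite | github.com/ethanfurman/scription | scription/__init__.py | _rewrite_args
-- ===== SOURCE A (Python) =====
-- def _rewrite_args(args):
--     "prog -abc heh --foo bar  -->  prog -a -b -c heh --foo bar"
--     new_args = []
--     pass_through = False
--     for arg in args:
--         if arg == '--':
--             pass_through = True
--         if pass_through:
--             new_args.append(arg)
--             continue
--         if arg.startswith('--') or not arg.startswith('-'):
--             new_args.append(arg)
--             continue
--         for ch in arg[1:]:
--             new_args.append('-%s' % ch)
--     return new_args
-- ===== SOURCE B (Python) =====
-- def _rewrite_args(args):
--     args = list(args)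
--     try:
--         split = args.index('--')
--     except ValueError:
--         split = len(args)
--     out = []
--     for arg in args[:split]:
--         if arg.startswith('--') or not arg.startswith('-'):
--             out.append(arg)
--         else:
--             out.extend('-' + ch for ch in arg[1:])
--     return out + args[split:]
-- ===== Notes on version B (the rewrite author's own statement) =====
-- stated objective: alternative
-- what changed: B replaces A's stateful pass_through flag with a split at the first '--': it expands the prefix with a per-argument expansion helper and appends the tail verbatim.
import Mathlib
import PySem

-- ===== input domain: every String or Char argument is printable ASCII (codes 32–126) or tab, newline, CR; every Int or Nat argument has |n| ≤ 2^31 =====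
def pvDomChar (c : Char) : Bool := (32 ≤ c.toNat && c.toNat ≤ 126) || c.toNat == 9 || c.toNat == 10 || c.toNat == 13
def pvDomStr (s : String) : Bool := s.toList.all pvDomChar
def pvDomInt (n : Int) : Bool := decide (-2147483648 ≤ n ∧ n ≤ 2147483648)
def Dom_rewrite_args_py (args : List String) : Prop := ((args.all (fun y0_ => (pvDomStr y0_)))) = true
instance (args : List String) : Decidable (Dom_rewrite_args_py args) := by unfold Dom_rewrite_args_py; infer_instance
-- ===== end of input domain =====

-- B replaces A's stateful pass_through flag with a split at the first '--': expand the
-- prefix, append the tail verbatim (alternative decomposition, same cost).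

-- ===== PORT A =====
-- literal transliteration of A: one fold carrying (new_args, pass_through)
def rewrite_args_py (args : List String) : List String :=
  (args.foldl
    (fun (st : List String × Bool) arg =>
      let pt := if arg == "--" then true else st.2
      if pt then (st.1 ++ [arg], pt)
      else if PySem.Str.startswith arg "--" || !PySem.Str.startswith arg "-" then
        (st.1 ++ [arg], pt)
      else
        (st.1 ++ (arg.toList.drop 1).map (fun ch => String.mk ['-', ch]), pt))
    ([], false)).1

-- ===== PORT B =====
-- per-argument expansion (the loop body of Source B)
def pvExpandOne (arg : String) : List String :=
  if PySem.Str.startswith arg "--" || !PySem.Str.startswith arg "-" then [arg]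
  else (arg.toList.drop 1).map (fun ch => String.mk ['-', ch])

def rewrite_args_py_alt (args : List String) : List String :=
  ((args.take ((PySem.List.index? args "--").getD args.length)).foldl
      (fun acc arg => acc ++ pvExpandOne arg) [])
    ++ args.drop ((PySem.List.index? args "--").getD args.length)

-- ===== PRECONDITION & SPEC =====
def Spec_rewrite_args_py (args : List String) (out : List String) : Prop := out = rewrite_args_py_alt args
instance (args : List String) (out : List String) : Decidable (Spec_rewrite_args_py args out) := by unfold Spec_rewrite_args_py; infer_instance

-- ===== CLAIM (what is proved, stated in full; the proofs are below) =====
def Claim_equal_rewrite_args_py : Prop := ∀ (args : List String), Dom_rewrite_args_py args → Spec_rewrite_args_py args (rewrite_args_py args)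

-- ===== LEMMAS AND PROOFS =====

-- abbreviation for A's step function (proof-side only)
def pvStepA (st : List String × Bool) (arg : String) : List String × Bool :=
  let pt := if arg == "--" then true else st.2
  if pt then (st.1 ++ [arg], pt)
  else if PySem.Str.startswith arg "--" || !PySem.Str.startswith arg "-" then
    (st.1 ++ [arg], pt)
  else
    (st.1 ++ (arg.toList.drop 1).map (fun ch => String.mk ['-', ch]), pt)

-- once pass_through is true, A appends everything verbatim
theorem pvFoldA_true (args : List String) (acc : List String) :
    args.foldl pvStepA (acc, true) = (acc ++ args, true) := by
  induction args generalizing acc with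
  | nil => simp
  | cons a rest ih =>
    simp only [List.foldl_cons, pvStepA]
    simp [ih]

-- with pass_through false, A computes B's result
theorem pvFoldA_false (args : List String) (acc : List String) :
    (args.foldl pvStepA (acc, false)).1 = acc ++ rewrite_args_py_alt args := by
  induction args generalizing acc with
  | nil => simp [rewrite_args_py_alt, PySem.List.index?]
  | cons a rest ih =>
    by_cases h : a = "--"
    · subst h
      simp only [List.foldl_cons, pvStepA]
      unfold rewrite_args_py_alt
      rw [PySem.List.index?_cons_self]
      simp [pvFoldA_true]
    · have hne : (a == "--") = false := by simp [h]
      have hsplit : rewrite_args_py_alt (a :: rest) = pvExpandOne a ++ rewrite_args_py_alt rest := by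
        unfold rewrite_args_py_alt
        rw [PySem.List.index?_cons_of_ne rest h]
        cases hi : PySem.List.index? rest "--" with
        | none =>
          simp only [Option.map_none, Option.getD_none, List.length_cons,
            List.take_length, List.drop_length, List.append_nil]
          rw [List.take_of_length_le (by simp), PySem.List.foldl_append_eq_flatMap,
            PySem.List.foldl_append_eq_flatMap]
          simp [List.flatMap_cons]
        | some i =>
          simp only [Option.map_some, Option.getD_some, List.take_succ_cons, List.drop_succ_cons]
          rw [PySem.List.foldl_append_eq_flatMap, PySem.List.foldl_append_eq_flatMap]
          simp [List.flatMap_cons]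
      rw [hsplit]
      simp only [List.foldl_cons, pvStepA, hne, Bool.false_eq_true, if_false]
      by_cases hb : (PySem.Str.startswith a "--" || !PySem.Str.startswith a "-") = true
      · simp only [hb, if_true, ih]
        simp only [pvExpandOne, hb, if_true, List.append_assoc]
      · simp only [Bool.not_eq_true] at hb
        simp only [hb, Bool.false_eq_true, if_false, ih]
        simp only [pvExpandOne, hb, Bool.false_eq_true, if_false, List.append_assoc]

-- ===== VERDICT (by name: the statement is the Claim_ definition above) =====
theorem rewrite_args_py_spec : Claim_equal_rewrite_args_py := by
  intro args _
  show rewrite_args_py args = rewrite_args_py_alt args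
  have : rewrite_args_py args = (args.foldl pvStepA ([], false)).1 := rfl
  rw [this, pvFoldA_false]
  simp
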